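-- pv_equiv track=rewrite | github.com/tnschneider/puzzles | aoc/2016/aoc8.py | rotate_col
-- ===== SOURCE A (Python) =====
-- def rotate_col(screen, col, by):
-- 	newcol = []
-- 	for i in range(len(screen)):
-- 		take = (i - by) % len(screen)
-- 		newcol += [screen[take][col]]
-- 	for j in range(len(screen)):
-- 		screen[j][col] = newcol[j]
-- 	return screen
-- ===== SOURCE B (Python) =====
-- def rotate_col(screen, col, by):
-- 	n = len(screen)
-- 	if n == 0:
-- 		return screen
-- 	k = by % n
-- 	old = [row[col] for row in screen]
-- 	new = old[n - k:] + old[:n - k]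
-- 	for j in range(n):
-- 		screen[j][col] = new[j]
-- 	return screen
-- ===== Notes on version B (the rewrite author's own statement) =====
-- stated objective: alternative
-- what changed: B extracts the whole column, rotates it once by slice concatenation at split point n - by % n, and writes it back, instead of A's fused loop computing each cell with a per-index (i - by) % n modular gather.
import Mathlib
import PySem

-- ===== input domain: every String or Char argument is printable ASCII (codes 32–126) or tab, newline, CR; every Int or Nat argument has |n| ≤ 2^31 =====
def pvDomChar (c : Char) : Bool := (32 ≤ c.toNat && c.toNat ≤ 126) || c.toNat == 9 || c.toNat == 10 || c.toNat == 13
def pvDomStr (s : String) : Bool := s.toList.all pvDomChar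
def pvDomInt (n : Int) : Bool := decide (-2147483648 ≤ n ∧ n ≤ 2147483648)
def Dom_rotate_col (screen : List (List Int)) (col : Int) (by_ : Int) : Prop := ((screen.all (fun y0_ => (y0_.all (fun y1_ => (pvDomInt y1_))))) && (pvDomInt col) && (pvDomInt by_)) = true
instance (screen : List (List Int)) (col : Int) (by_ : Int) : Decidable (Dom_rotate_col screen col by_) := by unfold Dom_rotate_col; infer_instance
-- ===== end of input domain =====

-- B rotates the extracted column once by slice concatenation instead of A's per-index
-- modular gather; 'alternative' decomposition, return-value equivalence (both Pythons
-- mutate screen's rows in place the same way).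

-- ===== PORT A =====
def rotate_col (screen : List (List Int)) (col : Int) (by_ : Int) : List (List Int) :=
  let newcol := (PySem.List.pyRange 0 (screen.length : Int) 1).foldl
    (fun acc i =>
      acc ++ [PySem.List.pyGetD
        (PySem.List.pyGetD screen (PySem.Int.mod (i - by_) (screen.length : Int)) []) col 0]) []
  (PySem.List.pyRange 0 (screen.length : Int) 1).foldl
    (fun scr j =>
      PySem.List.pySetD scr j
        (PySem.List.pySetD (PySem.List.pyGetD scr j []) col (PySem.List.pyGetD newcol j 0)))
    screen

-- ===== PORT B =====
def rotate_col_alt (screen : List (List Int)) (col : Int) (by_ : Int) : List (List Int) :=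
  let n : Int := screen.length
  if n = 0 then screen else
  let k := PySem.Int.mod by_ n
  let old := screen.map (fun row => PySem.List.pyGetD row col 0)
  let new := PySem.List.slice old (some (n - k)) none ++ PySem.List.slice old none (some (n - k))
  (PySem.List.pyRange 0 n 1).foldl
    (fun scr j =>
      PySem.List.pySetD scr j
        (PySem.List.pySetD (PySem.List.pyGetD scr j []) col (PySem.List.pyGetD new j 0)))
    screen

-- ===== PRECONDITION & SPEC =====
-- Pre_ excludes exactly the inputs where Python A raises IndexError: col must be a valid
-- (possibly negative) Python index into every row of the screen.
def Pre_rotate_col (screen : List (List Int)) (col : Int) (by_ : Int) : Prop :=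
  ∀ row ∈ screen, PySem.Raise.InRange row.length col
instance (screen : List (List Int)) (col : Int) (by_ : Int) : Decidable (Pre_rotate_col screen col by_) := by unfold Pre_rotate_col; infer_instance
def pvWitness_rotate_col : List (List Int) × Int × Int := ([[1, 2], [3, 4], [5, 6]], 0, 1)

def Spec_rotate_col (screen : List (List Int)) (col : Int) (by_ : Int) (out : List (List Int)) : Prop := out = rotate_col_alt screen col by_
instance (screen : List (List Int)) (col : Int) (by_ : Int) (out : List (List Int)) : Decidable (Spec_rotate_col screen col by_ out) := by unfold Spec_rotate_col; infer_instance

-- ===== CLAIM (what is proved, stated in full; the proofs are below) =====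
def Claim_equal_rotate_col : Prop := ∀ (screen : List (List Int)) (col : Int) (by_ : Int), Dom_rotate_col screen col by_ → Pre_rotate_col screen col by_ → Spec_rotate_col screen col by_ (rotate_col screen col by_)

-- ===== LEMMAS AND PROOFS =====

-- modular congruence helper
theorem mod_shift (N i k by_ : Int) (hN : 0 < N) (hi0 : 0 ≤ i) (hi1 : i < N)
    (hk : PySem.Int.mod by_ N = k) :
    PySem.Int.mod (i - by_) N = if i < k then i - k + N else i - k := by
  have hk0 : 0 ≤ k := hk ▸ PySem.Int.mod_nonneg by_ hN
  have hk1 : k < N := hk ▸ PySem.Int.mod_lt by_ hN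
  rw [PySem.Int.mod_eq_emod_of_pos hN]
  rw [PySem.Int.mod_eq_emod_of_pos hN] at hk
  have h1 : (i - by_) % N = (i - k) % N := by
    rw [Int.sub_emod, hk, Int.emod_eq_of_lt hi0 hi1]
  rw [h1]
  split_ifs with h
  · have : (i - k) % N = (i - k + N * 1) % N := by
      rw [Int.add_mul_emod_self_left]
    rw [this]
    have := Int.emod_eq_of_lt (a := i - k + N * 1) (b := N) (by omega) (by omega)
    omega
  · exact Int.emod_eq_of_lt (by omega) (by omega)

theorem newcol_eq (screen : List (List Int)) (col by_ : Int) (hne : screen ≠ []) :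
    (PySem.List.pyRange 0 (screen.length : Int) 1).foldl
      (fun acc i =>
        acc ++ [PySem.List.pyGetD
          (PySem.List.pyGetD screen (PySem.Int.mod (i - by_) (screen.length : Int)) []) col 0]) []
    = (PySem.List.slice (screen.map (fun row => PySem.List.pyGetD row col 0))
          (some ((screen.length : Int) - PySem.Int.mod by_ (screen.length : Int))) none
       ++ PySem.List.slice (screen.map (fun row => PySem.List.pyGetD row col 0)) none
          (some ((screen.length : Int) - PySem.Int.mod by_ (screen.length : Int)))) := by
  have hn : 0 < screen.length := List.length_pos_iff.mpr hne
  have hN : 0 < (screen.length : Int) := by exact_mod_cast hn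
  set k := PySem.Int.mod by_ (screen.length : Int) with hkdef
  have hk0 : 0 ≤ k := PySem.Int.mod_nonneg by_ hN
  have hk1 : k < (screen.length : Int) := PySem.Int.mod_lt by_ hN
  rw [PySem.List.foldl_append_singleton_eq_map,
      PySem.List.slice_from _ (by omega), PySem.List.slice_to _ (by omega)]
  simp only [List.nil_append]
  apply List.ext_getElem
  · simp [PySem.List.length_pyRange_one]
    omega
  · intro i h1 h2
    have hi : i < screen.length := by
      simpa [PySem.List.length_pyRange_one] using h1
    rw [List.getElem_map, PySem.List.getElem_pyRange_one]
    simp only [zero_add]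
    have hmod := mod_shift (screen.length : Int) (i : Int) k by_ hN (by omega)
        (by omega) hkdef.symm
    set d : Nat := ((screen.length : Int) - k).toNat with hd
    by_cases hcase : (i:Int) < k
    · rw [if_pos hcase] at hmod
      have hlt : i < ((screen.map (fun row => PySem.List.pyGetD row col 0)).drop d).length := by
        simp; omega
      rw [List.getElem_append_left hlt, List.getElem_drop, List.getElem_map]
      rw [PySem.List.pyGetD_eq_getElem screen [] (PySem.Int.mod_nonneg _ hN)
            (by rw [hmod]; omega)]
      congr 1
      exact getElem_congr rfl (by rw [hmod]; omega) (by omega)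
    · rw [if_neg hcase] at hmod
      rw [List.getElem_append_right (le_of_not_gt (by simp; omega))]
      rw [List.getElem_take, List.getElem_map]
      rw [PySem.List.pyGetD_eq_getElem screen [] (PySem.Int.mod_nonneg _ hN)
            (by rw [hmod]; omega)]
      congr 1
      exact getElem_congr rfl (by rw [hmod]; simp; omega) (by omega)

-- ===== VERDICT (by name: the statement is the Claim_ definition above) =====
theorem rotate_col_spec : Claim_equal_rotate_col := by
  intro screen col by_ _ _
  unfold Spec_rotate_col
  by_cases h : screen = []
  · subst h
    simp [rotate_col, rotate_col_alt]
  · have h0 : ¬ ((screen.length : Int) = 0) := by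
      have := List.length_pos_iff.mpr h
      omega
    simp only [rotate_col, rotate_col_alt]
    rw [if_neg h0, newcol_eq screen col by_ h]
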